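-- pv_equiv track=rewrite | github.com/jbkarvens/baekjoon | 백준/Ruby/18607. Domino Covering/Domino Covering.py | poly_mod
-- ===== SOURCE A (Python) =====
-- def poly_mod(f,g,p):
--     n=len(f)-1
--     m=len(g)-1
--     res = f[:]
--     a0=pow(g[-1],-1,p)
--     for i in reversed(range(n-m+1)):
--         a = res[i+m]*a0
--         for j in range(m+1):
--             res[i+j]-=a*g[j]
--     for i in range(len(res)):
--         res[i]%=p
--     while len(res)>1 and res[-1]==0:
--         res.pop()
--     return res
-- ===== SOURCE B (Python) =====
-- def poly_mod(f, g, p):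
--     # Streaming (Horner-style) polynomial division: a length-m window holds the current
--     # partial remainder, reduced mod p at every step, updated in place.
--     m = len(g) - 1
--     inv = pow(g[-1], -1, p)
--     if not f:
--         return []
--     if m == 0:
--         return [0]
--     if len(f) <= m:
--         r = [x % p for x in f] + [0] * (m - len(f))
--     else:
--         r = [x % p for x in f[len(f) - m:]]
--         for k in range(len(f) - m - 1, -1, -1):
--             a = r[m - 1] * inv % p
--             for j in range(m - 1, 0, -1):
--                 r[j] = (r[j - 1] - a * g[j]) % p
--             r[0] = (f[k] - a * g[0]) % p
--     while len(r) > 1 and r[-1] == 0: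
--         r.pop()
--     return r
-- ===== Notes on version B (the rewrite author's own statement) =====
-- stated objective: alternative
-- what changed: Replaces A's in-place elimination over a full-length copy of f (coefficients kept unreduced until a final mod pass) by a streaming Horner-style division that keeps only a length-m window of the partial remainder, reduced mod p at every step.
import Mathlib
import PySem

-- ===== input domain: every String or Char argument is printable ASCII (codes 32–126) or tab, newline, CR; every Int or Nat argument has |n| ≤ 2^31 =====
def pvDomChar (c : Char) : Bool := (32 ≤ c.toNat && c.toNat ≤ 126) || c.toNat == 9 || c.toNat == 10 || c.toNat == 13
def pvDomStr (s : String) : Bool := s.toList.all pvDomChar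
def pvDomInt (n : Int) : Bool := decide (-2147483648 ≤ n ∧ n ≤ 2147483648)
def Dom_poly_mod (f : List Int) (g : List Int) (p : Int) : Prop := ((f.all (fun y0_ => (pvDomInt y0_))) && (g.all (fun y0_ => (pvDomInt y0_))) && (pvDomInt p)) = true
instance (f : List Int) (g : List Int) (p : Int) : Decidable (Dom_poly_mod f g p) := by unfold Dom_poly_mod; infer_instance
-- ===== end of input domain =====

-- B replaces A's in-place elimination over a full-length copy of f (coefficients unreduced
-- until a final mod pass) by a streaming Horner-style division keeping only a length-m
-- window of the partial remainder, reduced mod p at every step (alternative algorithm).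


-- ===== PORT A =====
-- hand port of Python's pow(a, -1, p) (PySem.Int.powMod only takes Nat exponents):
-- extended-gcd inverse reduced with Python `%`; exact whenever Python returns (gcd(a,p)=1, p≠0 — Pre_).
def pyInvMod (a p : Int) : Int :=
  PySem.Int.mod (Nat.gcdA ((a.emod (p.natAbs : Int)).toNat) p.natAbs) p

-- `while len(res)>1 and res[-1]==0: res.pop()`, acting on the reversed list (both Pythons contain
-- this loop verbatim, so both ports share it)
def popZeros : List Int → List Int
  | [] => []
  | [x] => [x]
  | x :: rest => if x = 0 then popZeros rest else x :: rest

def trimPop (res : List Int) : List Int := (popZeros res.reverse).reverse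

-- inner loop `for j in range(m+1): res[i+j] -= a*g[j]` (m+1 = len g; indices are the same
-- nonnegative in-range Python indices, written as Nat)
def aInner (g : List Int) (a : Int) (i : Nat) (res : List Int) : List Int :=
  (List.range g.length).foldl (fun r j => r.set (i + j) (r.getD (i + j) 0 - a * g.getD j 0)) res

-- one outer-loop body: a = res[i+m]*a0 then the inner loop
def aOuter (g : List Int) (a0 : Int) (res : List Int) (i : Nat) : List Int :=
  aInner g (res.getD (i + (g.length - 1)) 0 * a0) i res

-- port of A: reversed(range(n-m+1)) = (List.range (len f + 1 - len g)).reverse (empty when n<m),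
-- g[-1] = g.getD (len g - 1) 0 for the g ≠ [] admitted by Pre_
def poly_mod (f : List Int) (g : List Int) (p : Int) : List Int :=
  let a0 := pyInvMod (g.getD (g.length - 1) 0) p
  let res := ((List.range (f.length + 1 - g.length)).reverse).foldl (aOuter g a0) f
  trimPop (res.map (fun x => PySem.Int.mod x p))

-- ===== PORT B =====
-- one step of B's loop body: the in-place downward shift `for j in range(m-1,0,-1): r[j] = ...;
-- r[0] = ...` reads only pre-step values, so it is the simultaneous update written out
def bStep (g : List Int) (p : Int) (inv : Int) (r : List Int) (c : Int) : List Int :=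
  let m := g.length - 1
  let a := PySem.Int.mod (r.getD (m - 1) 0 * inv) p
  PySem.Int.mod (c - a * g.getD 0 0) p ::
    (List.range' 1 (m - 1)).map (fun j => PySem.Int.mod (r.getD (j - 1) 0 - a * g.getD j 0) p)

-- port of B: f[len(f)-m:] = f.drop (len f - m), f[:len(f)-m] consumed top-down = reverse-fold;
-- the final while/pop trim is trimPop
def poly_mod_alt (f : List Int) (g : List Int) (p : Int) : List Int :=
  let m := g.length - 1
  let inv := pyInvMod (g.getD (g.length - 1) 0) p
  if f = [] then []
  else if m = 0 then [0]
  else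
    trimPop (if f.length ≤ m then
        (f.map (fun x => PySem.Int.mod x p)) ++ List.replicate (m - f.length) 0
      else
        ((f.take (f.length - m)).reverse).foldl (bStep g p inv)
          ((f.drop (f.length - m)).map (fun x => PySem.Int.mod x p)))


-- ===== PRECONDITION & SPEC =====
-- exactly the inputs on which A returns: pow(g[-1],-1,p) raises iff g = [] (IndexError),
-- p = 0 or gcd(g[-1],p) ≠ 1 (ValueError); everything else in A is total
def Pre_poly_mod (f : List Int) (g : List Int) (p : Int) : Prop :=
  g ≠ [] ∧ p ≠ 0 ∧ Int.gcd (g.getD (g.length - 1) 0) p = 1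

instance (f : List Int) (g : List Int) (p : Int) : Decidable (Pre_poly_mod f g p) := by
  unfold Pre_poly_mod; infer_instance

def pvWitness_poly_mod : List Int × List Int × Int := ([3, 1, 4, 1, 5], [2, 0, 1], 7)

def Spec_poly_mod (f : List Int) (g : List Int) (p : Int) (out : List Int) : Prop := out = poly_mod_alt f g p
instance (f : List Int) (g : List Int) (p : Int) (out : List Int) : Decidable (Spec_poly_mod f g p out) := by unfold Spec_poly_mod; infer_instance

-- ===== CLAIM (what is proved, stated in full; the proofs are below) =====
def Claim_equal_poly_mod : Prop := ∀ (f : List Int) (g : List Int) (p : Int), Dom_poly_mod f g p → Pre_poly_mod f g p → Spec_poly_mod f g p (poly_mod f g p)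

-- ===== LEMMAS AND PROOFS =====

-- partial states: A's res after the outer iterations i = n-m, …, k, and B's register after
-- consuming f[n], …, f[k]
def Ares (f g : List Int) (a0 : Int) (k : Nat) : List Int :=
  ((List.range (f.length + 1 - g.length)).drop k).reverse.foldl (aOuter g a0) f

def Bres (f g : List Int) (p inv : Int) (m k : Nat) : List Int :=
  ((f.take (f.length - m)).drop k).reverse.foldl (bStep g p inv)
    ((f.drop (f.length - m)).map (fun x => PySem.Int.mod x p))

-- Python-mod congruence: values in the same residue class reduce to the same representative
theorem pymod_congr (x y p : Int) (hp : p ≠ 0) (h : p ∣ (x - y)) :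
    PySem.Int.mod x p = PySem.Int.mod y p := by
  have h1 := PySem.Int.floordiv_mul_add_mod x p
  have h2 := PySem.Int.floordiv_mul_add_mod y p
  obtain ⟨c, hc⟩ := h
  have hd : p ∣ (PySem.Int.mod x p - PySem.Int.mod y p) :=
    ⟨c - PySem.Int.floordiv x p + PySem.Int.floordiv y p, by linear_combination h1 - h2 + hc⟩
  have habs : |PySem.Int.mod x p - PySem.Int.mod y p| < |p| := by
    rcases lt_or_gt_of_ne hp with hneg | hpos
    · have b1 := PySem.Int.mod_neg_bounds x hneg
      have b2 := PySem.Int.mod_neg_bounds y hneg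
      rw [abs_lt, abs_of_neg hneg]; omega
    · have b1 := PySem.Int.mod_nonneg x hpos
      have b2 := PySem.Int.mod_nonneg y hpos
      have b3 := PySem.Int.mod_lt x hpos
      have b4 := PySem.Int.mod_lt y hpos
      rw [abs_lt, abs_of_pos hpos]; omega
  have := Int.eq_zero_of_abs_lt_dvd ((abs_dvd _ _).mpr hd) habs
  omega

theorem pymod_zero_of_dvd (x p : Int) (h : p ∣ x) : PySem.Int.mod x p = 0 := by
  exact (PySem.Int.mod_eq_zero_iff_dvd x p).mpr h

theorem pymod_sub_self_dvd (x p : Int) : p ∣ (PySem.Int.mod x p - x) := by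
  have h1 := PySem.Int.floordiv_mul_add_mod x p
  exact ⟨-PySem.Int.floordiv x p, by linear_combination h1⟩

-- pyInvMod really inverts mod p when gcd = 1
theorem pyInvMod_spec (a p : Int) (hp : p ≠ 0) (h : Int.gcd a p = 1) :
    p ∣ (a * pyInvMod a p - 1) := by
  have hn0 : p.natAbs ≠ 0 := Int.natAbs_ne_zero.mpr hp
  have hnpos : (0:Int) < (p.natAbs : Int) := by exact_mod_cast Nat.pos_of_ne_zero hn0
  set n : Nat := p.natAbs with hn
  set r : Nat := (a.emod (n : Int)).toNat with hrdef
  have hr : (r : Int) = a.emod (n : Int) :=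
    Int.toNat_of_nonneg (Int.emod_nonneg a (by exact_mod_cast hnpos.ne'))
  have hnp : ∀ x : Int, (n : Int) ∣ x → p ∣ x := fun x hx => (Int.natAbs_dvd).mp hx
  have hra : (n : Int) ∣ (a - (r : Int)) := ⟨a / (n : Int), by
    have hh : a.emod (n : Int) = a - (n : Int) * (a / (n : Int)) := Int.emod_def a _
    rw [hr, hh]; ring⟩
  have hcop : IsCoprime a p := Int.isCoprime_iff_gcd_eq_one.mpr h
  have hcop_n : IsCoprime a ((n : Int)) := by
    rw [Int.isCoprime_iff_gcd_eq_one] at hcop ⊢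
    simpa [Int.gcd] using hcop
  obtain ⟨t, ht⟩ := hra
  have hcop_r : IsCoprime ((r : Int)) ((n : Int)) := by
    have := hcop_n.add_mul_left_left (-t)
    have har : a + (n : Int) * -t = (r : Int) := by linear_combination ht
    rwa [har] at this
  have hgcd1 : Nat.gcd r n = 1 := by
    have := Int.isCoprime_iff_gcd_eq_one.mp hcop_r
    simpa [Int.gcd] using this
  have hbez := Nat.gcd_eq_gcd_ab r n
  rw [hgcd1] at hbez
  have hnA : (n : Int) ∣ ((r : Int) * Nat.gcdA r n - 1) :=
    ⟨-(Nat.gcdB r n), by push_cast at hbez ⊢; linear_combination -hbez⟩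
  have hpA : p ∣ (a * Nat.gcdA r n - 1) := by
    have h1 : p ∣ ((a - (r : Int)) * Nat.gcdA r n) := (hnp _ ⟨t, ht⟩).mul_right _
    have h2 := hnp _ hnA
    obtain ⟨u, hu⟩ := h1; obtain ⟨v, hv⟩ := h2
    exact ⟨u + v, by linear_combination hu + hv⟩
  have hmm := pymod_sub_self_dvd (Nat.gcdA r n) p
  obtain ⟨u, hu⟩ := hmm; obtain ⟨v, hv⟩ := hpA
  unfold pyInvMod
  rw [← hn, ← hrdef]
  exact ⟨a * u + v, by linear_combination a * hu + hv⟩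

theorem innerFold_getD (g res : List Int) (a : Int) (i N : Nat) (hN : i + N ≤ res.length) :
    ((List.range N).foldl (fun r j => r.set (i + j) (r.getD (i + j) 0 - a * g.getD j 0)) res).length = res.length ∧
    ∀ idx, ((List.range N).foldl (fun r j => r.set (i + j) (r.getD (i + j) 0 - a * g.getD j 0)) res).getD idx 0 =
      if i ≤ idx ∧ idx < i + N then res.getD idx 0 - a * g.getD (idx - i) 0 else res.getD idx 0 := by
  revert hN
  induction N with
  | zero => intro _; simp
  | succ N ih =>
    intro hN
    obtain ⟨ihlen, ihget⟩ := ih (by omega)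
    simp only [List.range_succ, List.foldl_append, List.foldl_cons, List.foldl_nil]
    have hgetset : ∀ (l : List Int) (nn : Nat) (v : Int) (ix : Nat),
        (l.set nn v).getD ix 0 = if nn = ix ∧ nn < l.length then v else l.getD ix 0 := by
      intro l nn v ix
      simp only [List.getD_eq_getElem?_getD, List.getElem?_set]
      split_ifs with h1 h2 h3 h4 <;> simp_all <;> omega
    refine ⟨by rw [List.length_set]; exact ihlen, ?_⟩
    intro idx
    rw [hgetset, ihlen, ihget ((i : Nat) + N), ihget idx]
    by_cases h1 : i + N = idx
    · have h2 : ¬ (i ≤ i + N ∧ i + N < i + N) := by omega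
      have h3 : idx - i = N := by omega
      simp only [h2, if_false]
      split_ifs <;> simp_all <;> omega
    · split_ifs <;> first | rfl | omega

theorem Ares_last (f g : List Int) (a0 : Int) (k : Nat) (hk : f.length + 1 - g.length ≤ k) :
    Ares f g a0 k = f := by
  unfold Ares
  rw [List.drop_eq_nil_of_le (by rw [List.length_range]; omega)]
  simp

theorem Ares_step (f g : List Int) (a0 : Int) (k : Nat) (hk : k < f.length) :
    Ares f g a0 k =
      if k + g.length ≤ f.length then aOuter g a0 (Ares f g a0 (k + 1)) k else Ares f g a0 (k + 1) := by
  unfold Ares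
  by_cases h : k + g.length ≤ f.length
  · rw [if_pos h]
    have hlt : k < (List.range (f.length + 1 - g.length)).length := by
      rw [List.length_range]; omega
    rw [List.drop_eq_getElem_cons hlt, List.getElem_range]
    simp [List.foldl_append]
  · rw [if_neg h]
    rw [List.drop_eq_nil_of_le (by rw [List.length_range]; omega),
        List.drop_eq_nil_of_le (by rw [List.length_range]; omega)]

theorem Bres_last (f g : List Int) (p inv : Int) (m k : Nat) (hk : f.length - m ≤ k) :
    Bres f g p inv m k = (f.drop (f.length - m)).map (fun x => PySem.Int.mod x p) := by
  unfold Bres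
  have hnil : (f.take (f.length - m)).drop k = [] :=
    List.drop_eq_nil_of_le (by rw [List.length_take]; omega)
  rw [hnil]
  simp

theorem Bres_step (f g : List Int) (p inv : Int) (m k : Nat) (hk : k < f.length - m) :
    Bres f g p inv m k = bStep g p inv (Bres f g p inv m (k + 1)) (f.getD k 0) := by
  unfold Bres
  have hkt : k < (f.take (f.length - m)).length := by
    rw [List.length_take]; omega
  rw [List.drop_eq_getElem_cons hkt]
  have hfd : (f.take (f.length - m))[k] = f.getD k 0 := by
    rw [List.getElem_take, List.getD_eq_getElem _ _ (by omega)]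
  rw [hfd, List.reverse_cons, List.foldl_append]
  simp only [List.foldl_cons, List.foldl_nil]

theorem bStep_getD (g : List Int) (p inv c : Int) (r : List Int) (m : Nat) (hm : 1 ≤ m)
    (hM : g.length = m + 1) :
    (bStep g p inv r c).length = m ∧
    ∀ j, j < m → (bStep g p inv r c).getD j 0 =
      if j = 0 then PySem.Int.mod (c - PySem.Int.mod (r.getD (m - 1) 0 * inv) p * g.getD 0 0) p
      else PySem.Int.mod (r.getD (j - 1) 0 - PySem.Int.mod (r.getD (m - 1) 0 * inv) p * g.getD j 0) p := by
  have hml : g.length - 1 = m := by omega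
  unfold bStep
  rw [hml]
  constructor
  · simp; omega
  · intro j hj
    rcases Nat.eq_zero_or_pos j with hj0 | hjpos
    · subst hj0; simp
    · have hcons : ∀ (x : Int) (l : List Int), (x :: l).getD j 0 = l.getD (j - 1) 0 := by
        intro x l
        cases j with
        | zero => omega
        | succ jj => simp
      rw [hcons, if_neg (by omega)]
      have hlen : j - 1 < ((List.range' 1 (m - 1)).map
          (fun jj => PySem.Int.mod (r.getD (jj - 1) 0 -
            PySem.Int.mod (r.getD (m - 1) 0 * inv) p * g.getD jj 0) p)).length := by
        simp; omega
      rw [List.getD_eq_getElem?_getD, List.getElem?_eq_getElem hlen]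
      simp only [List.getElem_map, List.getElem_range']
      have : 1 + 1 * (j - 1) = j := by omega
      rw [this]
      simp


-- the main invariant, proved by downward induction over the position k = len f - d
theorem main_inv (f g : List Int) (p a0 : Int) (m : Nat) (hM : g.length = m + 1)
    (hm1 : 1 ≤ m) (hLm : m < f.length) (hp : p ≠ 0) (hinv : p ∣ (g.getD m 0 * a0 - 1)) :
    ∀ d : Nat, d ≤ f.length - m →
      (Ares f g a0 (f.length - m - d)).length = f.length ∧
      (∀ j, j < f.length - m - d → (Ares f g a0 (f.length - m - d)).getD j 0 = f.getD j 0) ∧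
      (Bres f g p a0 m (f.length - m - d)).length = m ∧
      (∀ j, j < m → (Bres f g p a0 m (f.length - m - d)).getD j 0 =
          PySem.Int.mod ((Ares f g a0 (f.length - m - d)).getD ((f.length - m - d) + j) 0) p) ∧
      (∀ idx, (f.length - m - d) + m ≤ idx → idx < f.length →
          PySem.Int.mod ((Ares f g a0 (f.length - m - d)).getD idx 0) p = 0) := by
  intro d
  induction d with
  | zero =>
    intro _
    rw [Nat.sub_zero, Ares_last f g a0 (f.length - m) (by omega),
        Bres_last f g p a0 m (f.length - m) (le_refl _)]
    have hdl : (f.drop (f.length - m)).length = m := by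
      rw [List.length_drop]; omega
    refine ⟨rfl, fun j hj => rfl, by rw [List.length_map, hdl], ?_, ?_⟩
    · intro j hj
      rw [List.getD_eq_getElem _ _ (by rw [List.length_map, hdl]; omega), List.getElem_map,
          List.getElem_drop, List.getD_eq_getElem _ _ (by omega)]
    · intro idx h1 h2; omega
  | succ d ih =>
    intro hd
    obtain ⟨ihA, ihB, ihC, ihD, ihF⟩ := ih (by omega)
    have hk1 : f.length - m - d = (f.length - m - (d + 1)) + 1 := by omega
    set k := f.length - m - (d + 1) with hkdef
    rw [hk1] at ihA ihB ihC ihD ihF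
    have hkLm : k < f.length - m := by omega
    have hkL : k < f.length := by omega
    have helim : k + g.length ≤ f.length := by omega
    have hAstep := Ares_step f g a0 k hkL
    rw [if_pos helim] at hAstep
    have hBstep := Bres_step f g p a0 m k hkLm
    have hml : g.length - 1 = m := by omega
    set R := Ares f g a0 (k + 1) with hR
    set W := Bres f g p a0 m (k + 1) with hW
    set v := R.getD (k + m) 0 with hv
    have houter : aOuter g a0 R k =
        (List.range g.length).foldl
          (fun r j => r.set (k + j) (r.getD (k + j) 0 - (v * a0) * g.getD j 0)) R := by
      unfold aOuter aInner
      rw [hml, ← hv]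
    obtain ⟨hAlen, hAget⟩ :=
      innerFold_getD g R (v * a0) k g.length (by rw [ihA]; exact helim)
    have hAk : ∀ idx, (Ares f g a0 k).getD idx 0 =
        if k ≤ idx ∧ idx < k + g.length then R.getD idx 0 - (v * a0) * g.getD (idx - k) 0
        else R.getD idx 0 := by
      intro idx; rw [hAstep, houter]; exact hAget idx
    have hAklen : (Ares f g a0 k).length = f.length := by
      rw [hAstep, houter, hAlen, ihA]
    have hdead : PySem.Int.mod ((Ares f g a0 k).getD (k + m) 0) p = 0 := by
      rw [hAk, if_pos (by omega)]
      have h1 : k + m - k = m := by omega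
      rw [h1]
      obtain ⟨c, hc⟩ := hinv
      exact pymod_zero_of_dvd _ p ⟨-v * c, by linear_combination (-v) * hc⟩
    have hlead : W.getD (m - 1) 0 = PySem.Int.mod v p := by
      have := ihD (m - 1) (by omega)
      have he : k + 1 + (m - 1) = k + m := by omega
      rw [he] at this
      rw [this, hv]
    refine ⟨hAklen, ?_, ?_, ?_, ?_⟩
    · -- untouched prefix
      intro j hj
      rw [hAk, if_neg (by omega)]
      exact ihB j (by omega)
    · rw [hBstep]
      exact (bStep_getD g p a0 (f.getD k 0) W m hm1 hM).1
    · -- the register tracks A's residues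
      intro j hj
      rw [hBstep, (bStep_getD g p a0 (f.getD k 0) W m hm1 hM).2 j hj, hlead]
      rcases Nat.eq_zero_or_pos j with hj0 | hjpos
      · subst hj0
        rw [if_pos rfl, hAk, if_pos (show k ≤ k + 0 ∧ k + 0 < k + g.length by omega)]
        have h1 : k + 0 - k = 0 := by omega
        rw [h1]
        have hfk : R.getD (k + 0) 0 = f.getD (k + 0) 0 := ihB (k + 0) (by omega)
        rw [hfk]
        have h2 : k + 0 = k := by omega
        rw [h2]
        obtain ⟨c1, hc1⟩ := pymod_sub_self_dvd (PySem.Int.mod v p * a0) p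
        obtain ⟨c2, hc2⟩ := pymod_sub_self_dvd v p
        refine pymod_congr _ _ p hp ⟨(-c1 - c2 * a0) * g.getD 0 0, by
          linear_combination (-g.getD 0 0) * hc1 + (-a0 * g.getD 0 0) * hc2⟩
      · rw [if_neg (show ¬ j = 0 by omega), hAk,
            if_pos (show k ≤ k + j ∧ k + j < k + g.length by omega)]
        have h1 : k + j - k = j := by omega
        rw [h1]
        have hwj : W.getD (j - 1) 0 = PySem.Int.mod (R.getD (k + j) 0) p := by
          have := ihD (j - 1) (by omega)
          have he : k + 1 + (j - 1) = k + j := by omega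
          rw [he] at this
          rw [this]
        rw [hwj]
        obtain ⟨c0, hc0⟩ := pymod_sub_self_dvd (R.getD (k + j) 0) p
        obtain ⟨c1, hc1⟩ := pymod_sub_self_dvd (PySem.Int.mod v p * a0) p
        obtain ⟨c2, hc2⟩ := pymod_sub_self_dvd v p
        refine pymod_congr _ _ p hp ⟨c0 + (-c1 - c2 * a0) * g.getD j 0, by
          linear_combination hc0 + (-g.getD j 0) * hc1 + (-a0 * g.getD j 0) * hc2⟩
    · -- dead positions
      intro idx hidx1 hidx2
      rcases Nat.lt_or_ge idx (k + g.length) with hlt | hge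
      · have hme : idx = k + m := by omega
        rw [hme]; exact hdead
      · rw [hAk, if_neg (by omega)]
        exact ihF idx (by omega) hidx2

-- the degenerate divisor (len g = 1): A zeroes every coefficient mod p
theorem main_m0 (f g : List Int) (p a0 : Int) (hM : g.length = 1) (hp : p ≠ 0)
    (hinv : p ∣ (g.getD 0 0 * a0 - 1)) :
    ∀ d : Nat, d ≤ f.length →
      (Ares f g a0 (f.length - d)).length = f.length ∧
      (∀ j, j < f.length - d → (Ares f g a0 (f.length - d)).getD j 0 = f.getD j 0) ∧
      (∀ idx, f.length - d ≤ idx → idx < f.length →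
          PySem.Int.mod ((Ares f g a0 (f.length - d)).getD idx 0) p = 0) := by
  intro d
  induction d with
  | zero =>
    intro _
    rw [Nat.sub_zero, Ares_last f g a0 f.length (by omega)]
    exact ⟨rfl, fun j hj => rfl, fun idx h1 h2 => by omega⟩
  | succ d ih =>
    intro hd
    obtain ⟨ihA, ihB, ihF⟩ := ih (by omega)
    have hk1 : f.length - d = (f.length - (d + 1)) + 1 := by omega
    set k := f.length - (d + 1) with hkdef
    rw [hk1] at ihA ihB ihF
    have hkL : k < f.length := by omega
    have helim : k + g.length ≤ f.length := by omega
    have hAstep := Ares_step f g a0 k hkL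
    rw [if_pos helim] at hAstep
    have hml : g.length - 1 = 0 := by omega
    set R := Ares f g a0 (k + 1) with hR
    set v := R.getD (k + 0) 0 with hv
    have houter : aOuter g a0 R k =
        (List.range g.length).foldl
          (fun r j => r.set (k + j) (r.getD (k + j) 0 - (v * a0) * g.getD j 0)) R := by
      unfold aOuter aInner
      rw [hml, ← hv]
    obtain ⟨hAlen, hAget⟩ :=
      innerFold_getD g R (v * a0) k g.length (by rw [ihA]; exact helim)
    have hAk : ∀ idx, (Ares f g a0 k).getD idx 0 =
        if k ≤ idx ∧ idx < k + g.length then R.getD idx 0 - (v * a0) * g.getD (idx - k) 0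
        else R.getD idx 0 := by
      intro idx; rw [hAstep, houter]; exact hAget idx
    refine ⟨by rw [hAstep, houter, hAlen, ihA], ?_, ?_⟩
    · intro j hj
      rw [hAk, if_neg (by omega)]
      exact ihB j (by omega)
    · intro idx hidx1 hidx2
      rcases Nat.lt_or_ge idx (k + g.length) with hlt | hge
      · have hme : idx = k := by omega
        rw [hAk, if_pos (by omega)]
        have h1 : idx - k = 0 := by omega
        rw [h1]
        have h2 : idx = k + 0 := by omega
        rw [h2, ← hv]
        obtain ⟨c, hc⟩ := hinv
        exact pymod_zero_of_dvd _ p ⟨-v * c, by linear_combination (-v) * hc⟩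
      · rw [hAk, if_neg (by omega)]
        exact ihF idx (by omega) hidx2


theorem popZeros_cons_cons (x y : Int) (rest : List Int) :
    popZeros (x :: y :: rest) = if x = 0 then popZeros (y :: rest) else x :: y :: rest := by
  rw [popZeros]; simp

theorem popZeros_zeros_append (s : Nat) (xs : List Int) (h : xs ≠ []) :
    popZeros (List.replicate s 0 ++ xs) = popZeros xs := by
  induction s with
  | zero => simp
  | succ s ih =>
    have : List.replicate (s + 1) (0 : Int) ++ xs = 0 :: (List.replicate s 0 ++ xs) := by
      simp [List.replicate_succ]
    rw [this]
    have hne : List.replicate s (0 : Int) ++ xs ≠ [] := by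
      simp [h]
    cases hcl : List.replicate s (0 : Int) ++ xs with
    | nil => exact absurd hcl hne
    | cons y rest =>
      rw [popZeros_cons_cons, if_pos rfl, ← hcl, ih]

theorem trimPop_append_zeros (xs : List Int) (s : Nat) (h : xs ≠ []) :
    trimPop (xs ++ List.replicate s 0) = trimPop xs := by
  unfold trimPop
  rw [List.reverse_append, List.reverse_replicate, popZeros_zeros_append _ _ (by simp [h])]

theorem trimPop_replicate (L : Nat) (h : 1 ≤ L) : trimPop (List.replicate L 0) = [0] := by
  obtain ⟨s, rfl⟩ : ∃ s, L = s + 1 := ⟨L - 1, by omega⟩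
  unfold trimPop
  rw [List.reverse_replicate, List.replicate_succ']
  rw [popZeros_zeros_append s [0] (by simp)]
  simp [popZeros]

theorem getD_ext (xs ys : List Int) (h1 : xs.length = ys.length)
    (h2 : ∀ i, i < xs.length → xs.getD i 0 = ys.getD i 0) : xs = ys := by
  apply List.ext_getElem h1
  intro i hx hy
  have := h2 i hx
  rwa [List.getD_eq_getElem _ _ hx, List.getD_eq_getElem _ _ hy] at this

-- ===== VERDICT (by name: the statement is the Claim_ definition above) =====
theorem poly_mod_spec : Claim_equal_poly_mod := by
  unfold Claim_equal_poly_mod Spec_poly_mod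
  intro f g p _ hpre
  obtain ⟨hg, hp, hgcd⟩ := hpre
  have hgl : 1 ≤ g.length := List.length_pos_iff.mpr hg
  set m := g.length - 1 with hmdef
  have hM : g.length = m + 1 := by omega
  set a0 := pyInvMod (g.getD (g.length - 1) 0) p with ha0
  have hinv : p ∣ (g.getD m 0 * a0 - 1) := by
    have := pyInvMod_spec (g.getD (g.length - 1) 0) p hp hgcd
    rw [← ha0] at this
    have he : g.length - 1 = m := rfl
    rwa [he] at this
  have hA_eq : poly_mod f g p =
      trimPop ((Ares f g a0 0).map (fun x => PySem.Int.mod x p)) := rfl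
  have hB_eq : poly_mod_alt f g p =
      if f = [] then []
      else if m = 0 then [0]
      else trimPop (if f.length ≤ m then
          (f.map (fun x => PySem.Int.mod x p)) ++ List.replicate (m - f.length) 0
        else Bres f g p a0 m 0) := rfl
  by_cases hf : f = []
  · subst hf
    rw [hA_eq, hB_eq, if_pos rfl]
    have hA0 : Ares [] g a0 0 = [] := by
      unfold Ares
      have h0 : List.length ([] : List Int) + 1 - g.length = 0 := by simp; omega
      rw [h0]
      simp
    rw [hA0]
    rfl
  · have hL : 1 ≤ f.length := List.length_pos_iff.mpr hf
    rw [hA_eq, hB_eq, if_neg hf]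
    have hAmap : ∀ (A0 : List Int), A0.length = f.length → ∀ i, i < f.length →
        (A0.map (fun x => PySem.Int.mod x p)).getD i 0 =
          PySem.Int.mod (A0.getD i 0) p := by
      intro A0 hlen i hi
      rw [List.getD_eq_getElem _ _ (by rw [List.length_map, hlen]; exact hi),
          List.getElem_map, List.getD_eq_getElem _ _ (by rw [hlen]; exact hi)]
    rcases Nat.eq_zero_or_pos m with hm0 | hm1
    · -- constant divisor: every residue is zero, both return [0]
      rw [if_pos hm0]
      obtain ⟨hAlen, hB0, hF⟩ := by
        have h := main_m0 f g p a0 (by omega) hp (by rw [← hm0]; exact hinv) f.length (le_refl _)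
        rwa [Nat.sub_self] at h
      have hAall : (Ares f g a0 0).map (fun x => PySem.Int.mod x p) =
          List.replicate f.length 0 := by
        apply getD_ext
        · simp [hAlen]
        · intro i hi
          rw [List.length_map, hAlen] at hi
          rw [hAmap _ hAlen i hi, hF i (by omega) hi, List.getD_replicate _ hi]
      rw [hAall, trimPop_replicate _ hL]
    · rw [if_neg (by omega)]
      rcases Nat.lt_or_ge m f.length with hmL | hmL
      · -- general case: A's reduced list is B's final window plus zero padding
        rw [if_neg (by omega)]
        obtain ⟨hAlen, hB0, hBlen, hD, hF⟩ := by
          have h := main_inv f g p a0 m hM hm1 hmL hp hinv (f.length - m) (le_refl _)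
          rwa [Nat.sub_self] at h
        set W := Bres f g p a0 m 0 with hW
        set A0 := Ares f g a0 0 with hA0
        have hE1 : A0.map (fun x => PySem.Int.mod x p) =
            W ++ List.replicate (f.length - m) 0 := by
          apply getD_ext
          · rw [List.length_map, hAlen, List.length_append, hBlen, List.length_replicate]
            omega
          · intro i hi
            rw [List.length_map, hAlen] at hi
            rw [hAmap _ hAlen i hi]
            rcases Nat.lt_or_ge i m with him | him
            · rw [List.getD_append _ _ _ i (by rw [hBlen]; omega)]
              have := hD i him
              have hz : 0 + i = i := by omega
              rw [hz] at this
              rw [this]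
            · rw [List.getD_append_right _ _ _ i (by rw [hBlen]; omega), hBlen,
                  hF i (by omega) hi, List.getD_replicate _ (by omega)]
        have hWne : W ≠ [] := List.ne_nil_of_length_pos (by rw [hBlen]; omega)
        rw [hE1, trimPop_append_zeros _ _ hWne]
      · -- short dividend: no reduction steps at all
        rw [if_pos (by omega)]
        have hA0f : Ares f g a0 0 = f := Ares_last f g a0 0 (by omega)
        rw [hA0f]
        have hmapne : f.map (fun x => PySem.Int.mod x p) ≠ [] := by
          simp [hf]
        rw [trimPop_append_zeros _ _ hmapne]
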